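-- pv_equiv track=rewrite | github.com/jcooper4837/roguelike-chess | main.py | findPreMoves
-- ===== SOURCE A (Python) =====
-- def findPreMoves(b,mv):
--     #finds all available premoves for selected piece. currently only pawns
--     x,y = mv[0][0],mv[0][1]
--     pmv = []
--     if b[x][y] == 2:
--         i = 1
--         while y-i >= 0:
--             if b[x][y-i] == 1 and i > 1:
--                 pmv.append([x,y-i])
--             else:
--                 if i > 1 or b[x][y-i] != 1:
--                     break
--             i += 1
--         i = 1
--         while x+i < len(b):
--             if b[x+i][y] == 1 and i > 1:
--                 pmv.append([x+i,y])
--             else: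
--                 if i > 1 or b[x+i][y] != 1:
--                     break
--             i += 1
--         i = 1
--         while y+i < len(b[0]):
--             if b[x][y+i] == 1 and i > 1:
--                 pmv.append([x,y+i])
--             else:
--                 if i > 1 or b[x][y+i] != 1:
--                     break
--             i += 1
--         i = 1
--         while x-i >= 0:
--             if b[x-i][y] == 1 and i > 1:
--                 pmv.append([x-i,y])
--             else:
--                 if i > 1 or b[x-i][y] != 1:
--                     break
--             i += 1
--     return pmv
-- ===== SOURCE B (Python) =====
-- def findPreMoves(b, mv):
--     # Declarative brute force: a cell at distance d>=2 in a direction is a premove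
--     # iff every cell on the path at distances 1..d holds 1; check each candidate with all().
--     x, y = mv[0][0], mv[0][1]
--     if b[x][y] != 2:
--         return []
--     h, w = len(b), len(b[0])
--     dirs = [(0, -1, y), (1, 0, h - 1 - x), (0, 1, w - 1 - y), (-1, 0, x)]
--     return [[x + dx * d, y + dy * d]
--             for dx, dy, m in dirs
--             for d in range(2, m + 1)
--             if all(b[x + dx * k][y + dy * k] == 1 for k in range(1, d + 1))]
-- ===== Notes on version B (the rewrite author's own statement) =====
-- stated objective: simpler
-- what changed: Replaces A's four copy-pasted stateful while loops (scan outward, break at the first non-1) by a declarative comprehension over direction triples that, for each candidate distance d >= 2 up to the in-bounds limit, independently re-checks with all() that every cell on the path at distances 1..d is 1.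
-- outside the precondition, e.g. on findPreMoves([[2, 0], [1, 0], [1, 0]], [[-3, 0]]): A returns [[-1, 0]], B returns [[-1, 0]]; on findPreMoves([[2, 1, 1], [9]], [[0, 0]]): A returns [[0, 2]], B returns [[0, 2]]
import Mathlib
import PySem

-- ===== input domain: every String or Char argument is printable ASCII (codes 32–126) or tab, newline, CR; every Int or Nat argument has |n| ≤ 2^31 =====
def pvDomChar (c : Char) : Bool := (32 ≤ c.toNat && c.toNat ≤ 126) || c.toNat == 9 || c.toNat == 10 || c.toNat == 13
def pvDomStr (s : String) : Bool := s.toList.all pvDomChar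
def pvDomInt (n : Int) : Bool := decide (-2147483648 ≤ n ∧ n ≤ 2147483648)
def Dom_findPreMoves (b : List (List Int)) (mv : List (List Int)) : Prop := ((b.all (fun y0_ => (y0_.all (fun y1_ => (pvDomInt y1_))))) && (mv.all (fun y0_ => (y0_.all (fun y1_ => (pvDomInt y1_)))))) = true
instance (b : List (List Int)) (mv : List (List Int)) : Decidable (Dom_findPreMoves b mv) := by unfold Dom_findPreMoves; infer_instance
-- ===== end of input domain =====

-- B replaces A's four stateful scan-and-break while loops by a declarative comprehension:
-- for each direction and each candidate distance d ≥ 2 up to the in-bounds limit, it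
-- independently re-checks with all() that the whole path at distances 1..d holds 1
-- (objective: simpler/declarative). Return values only; no mutation.

-- shared indexing helper: b[x][y] as Python evaluates it (pyGet? handles negative indices);
-- the .getD 0 default is only reached on inputs excluded by Pre_findPreMoves.
def cellOpt (b : List (List Int)) (x y : Int) : Option Int :=
  match PySem.List.pyGet? b x with
  | some row => PySem.List.pyGet? row y
  | none => none

def cell (b : List (List Int)) (x y : Int) : Int := (cellOpt b x y).getD 0

-- ===== PORT A =====
-- Each while loop is ported with a structural fuel counter; the fuel passed at the call
-- site (len(b) + len(b[0]) + 1) bounds the iteration count of each scan on every input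
-- admitted by Pre_findPreMoves, so the ports compute exactly what the Python loops do there.
def loopA1 (b : List (List Int)) (x y : Int) (i : Int) (pmv : List (List Int)) : Nat → List (List Int)
  | 0 => pmv
  | fuel + 1 =>
    if y - i ≥ 0 then
      if cell b x (y - i) = 1 ∧ i > 1 then loopA1 b x y (i + 1) (pmv ++ [[x, y - i]]) fuel
      else if i > 1 ∨ cell b x (y - i) ≠ 1 then pmv
      else loopA1 b x y (i + 1) pmv fuel
    else pmv

def loopA2 (b : List (List Int)) (x y : Int) (i : Int) (pmv : List (List Int)) : Nat → List (List Int)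
  | 0 => pmv
  | fuel + 1 =>
    if x + i < (b.length : Int) then
      if cell b (x + i) y = 1 ∧ i > 1 then loopA2 b x y (i + 1) (pmv ++ [[x + i, y]]) fuel
      else if i > 1 ∨ cell b (x + i) y ≠ 1 then pmv
      else loopA2 b x y (i + 1) pmv fuel
    else pmv

def loopA3 (b : List (List Int)) (x y : Int) (i : Int) (pmv : List (List Int)) : Nat → List (List Int)
  | 0 => pmv
  | fuel + 1 =>
    if y + i < ((b.headD []).length : Int) then
      if cell b x (y + i) = 1 ∧ i > 1 then loopA3 b x y (i + 1) (pmv ++ [[x, y + i]]) fuel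
      else if i > 1 ∨ cell b x (y + i) ≠ 1 then pmv
      else loopA3 b x y (i + 1) pmv fuel
    else pmv

def loopA4 (b : List (List Int)) (x y : Int) (i : Int) (pmv : List (List Int)) : Nat → List (List Int)
  | 0 => pmv
  | fuel + 1 =>
    if x - i ≥ 0 then
      if cell b (x - i) y = 1 ∧ i > 1 then loopA4 b x y (i + 1) (pmv ++ [[x - i, y]]) fuel
      else if i > 1 ∨ cell b (x - i) y ≠ 1 then pmv
      else loopA4 b x y (i + 1) pmv fuel
    else pmv

def findPreMoves (b : List (List Int)) (mv : List (List Int)) : List (List Int) :=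
  match mv with
  | (x :: y :: _) :: _ =>
    if cell b x y = 2 then
      let fuel := b.length + (b.headD []).length + 1
      loopA4 b x y 1 (loopA3 b x y 1 (loopA2 b x y 1 (loopA1 b x y 1 [] fuel) fuel) fuel) fuel
    else []
  | _ => []    -- Python raises here (mv[0][0]/mv[0][1]); outside Pre_findPreMoves

-- ===== PORT B =====
-- Source B's comprehension: for (dx,dy,m) in dirs, for d in range(2, m+1),
-- keep d iff all cells at distances 1..d are 1, emit [x+dx*d, y+dy*d]
def findPreMoves_alt (b : List (List Int)) (mv : List (List Int)) : List (List Int) :=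
  let r := mv.headD []
  let x := r.headD 0
  let y := (r.drop 1).headD 0
  if cell b x y ≠ 2 then []
  else
    let h : Int := (b.length : Int)
    let w : Int := ((b.headD []).length : Int)
    ([((0 : Int), (-1 : Int), y), (1, 0, h - 1 - x), (0, 1, w - 1 - y), (-1, 0, x)]).flatMap
      (fun t =>
        ((PySem.List.pyRange 2 (t.2.2 + 1) 1).filter
            (fun d => (PySem.List.pyRange 1 (d + 1) 1).all
              (fun k => cell b (x + t.1 * k) (y + t.2.1 * k) == 1))).map
          (fun d => [x + t.1 * d, y + t.2.1 * d]))

-- ===== PRECONDITION & SPEC =====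
-- Pre_ is the natural domain of the scan: the selected cell must exist, and when it holds a
-- pawn (value 2) the coordinates must be non-negative and the board rectangular — it excludes
-- inputs where A raises (missing mv[0][0]/mv[0][1], cell out of range, ragged rows the scan
-- crosses) and, as defensible-corner artefacts, inputs A only survives via Python
-- negative-index wraparound or a ragged board the scan happens not to cross (see claim cites).
def Pre_findPreMoves (b : List (List Int)) (mv : List (List Int)) : Prop :=
  1 ≤ mv.length ∧ 2 ≤ (mv.headD []).length ∧
  (cellOpt b ((mv.headD []).headD 0) ((mv.headD []).getD 1 0)).isSome = true ∧
  ((cellOpt b ((mv.headD []).headD 0) ((mv.headD []).getD 1 0)).getD 0 ≠ 2 ∨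
    (0 ≤ (mv.headD []).headD 0 ∧ 0 ≤ (mv.headD []).getD 1 0 ∧
      ∀ rw ∈ b, rw.length = (b.headD []).length))

instance (b : List (List Int)) (mv : List (List Int)) : Decidable (Pre_findPreMoves b mv) := by
  unfold Pre_findPreMoves; infer_instance

def pvWitness_findPreMoves : List (List Int) × List (List Int) :=
  ([[2, 1, 1, 1], [1, 0, 0, 0], [1, 0, 0, 0], [1, 0, 0, 0]], [[0, 0]])

def Spec_findPreMoves (b : List (List Int)) (mv : List (List Int)) (out : List (List Int)) : Prop := out = findPreMoves_alt b mv
instance (b : List (List Int)) (mv : List (List Int)) (out : List (List Int)) : Decidable (Spec_findPreMoves b mv out) := by unfold Spec_findPreMoves; infer_instance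

-- ===== CLAIM (what is proved, stated in full; the proofs are below) =====
def Claim_equal_findPreMoves : Prop := ∀ (b : List (List Int)) (mv : List (List Int)), Dom_findPreMoves b mv → Pre_findPreMoves b mv → Spec_findPreMoves b mv (findPreMoves b mv)

-- ===== LEMMAS AND PROOFS =====

-- proof-only skeleton of one A-side direction scan: at offset i, if ok i continue
-- (appending only for i > 1), else stop
def collect (ok : Int → Bool) (f : Int → List Int) : Int → Nat → List (List Int)
  | _, 0 => []
  | i, fuel + 1 => if ok i then (if i > 1 then [f i] else []) ++ collect ok f (i + 1) fuel else []

-- run length of consecutive ok-offsets starting after r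
def runC (ok : Int → Bool) : Int → Nat → Int
  | r, 0 => r
  | r, fuel + 1 => if ok (r + 1) then runC ok (r + 1) fuel else r

theorem runC_ge (ok : Int → Bool) : ∀ (fuel : Nat) (r : Int), r ≤ runC ok r fuel := by
  intro fuel
  induction fuel with
  | zero => intro r; simp [runC]
  | succ n ih =>
    intro r
    rw [runC]
    split
    · exact le_trans (by omega) (ih (r + 1))
    · exact le_refl r

theorem runC_le (ok : Int → Bool) (m : Int) (hbd : ∀ j, 1 ≤ j → ok j = true → j ≤ m) :
    ∀ (fuel : Nat) (r : Int), 0 ≤ r → runC ok r fuel ≤ max r m := by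
  intro fuel
  induction fuel with
  | zero => intro r _; simp [runC]
  | succ n ih =>
    intro r hr
    rw [runC]
    by_cases hok : ok (r + 1) = true
    · rw [if_pos hok]
      have h1 : r + 1 ≤ m := hbd (r + 1) (by omega) hok
      have := ih (r + 1) (by omega)
      omega
    · rw [if_neg hok]; omega

theorem runC_prefix (ok : Int → Bool) :
    ∀ (fuel : Nat) (r j : Int), r < j → j ≤ runC ok r fuel → ok j = true := by
  intro fuel
  induction fuel with
  | zero => intro r j h1 h2; rw [runC] at h2; omega
  | succ n ih =>
    intro r j h1 h2
    rw [runC] at h2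
    by_cases hok : ok (r + 1) = true
    · rw [if_pos hok] at h2
      by_cases hj : j = r + 1
      · subst hj; exact hok
      · exact ih (r + 1) j (by omega) h2
    · rw [if_neg hok] at h2; omega

theorem runC_stop (ok : Int → Bool) (m : Int) (hbd : ∀ j, 1 ≤ j → ok j = true → j ≤ m) :
    ∀ (fuel : Nat) (r : Int), 0 ≤ r → m - r < (fuel : Int) → ok (runC ok r fuel + 1) = false := by
  intro fuel
  induction fuel with
  | zero =>
    intro r hr hf
    rw [runC]
    by_contra hcon
    have hok : ok (r + 1) = true := by
      cases h : ok (r + 1) with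
      | false => exact absurd h hcon
      | true => rfl
    have := hbd (r + 1) (by omega) hok
    simp at hf
    omega
  | succ n ih =>
    intro r hr hf
    rw [runC]
    by_cases hok : ok (r + 1) = true
    · rw [if_pos hok]
      have h1 : r + 1 ≤ m := hbd (r + 1) (by omega) hok
      exact ih (r + 1) (by omega) (by push_cast at hf ⊢; omega)
    · rw [if_neg hok]
      cases h : ok (r + 1) with
      | false => rfl
      | true => exact absurd h hok

theorem collect_eq_pyRange (ok : Int → Bool) (f : Int → List Int) :
    ∀ (fuel : Nat) (r : Int), 0 ≤ r →
      collect ok f (r + 1) fuel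
        = (PySem.List.pyRange (max (r + 1) 2) (runC ok r fuel + 1) 1).map f := by
  intro fuel
  induction fuel with
  | zero =>
    intro r _
    rw [collect, runC, PySem.List.pyRange_one_eq_nil (by omega)]
    simp
  | succ n ih =>
    intro r hr
    rw [collect, runC]
    by_cases hok : ok (r + 1) = true
    · rw [if_pos hok, if_pos hok]
      have h2 : r + 1 + 1 = (r + 1) + 1 := rfl
      rw [h2, ih (r + 1) (by omega)]
      have hge : r + 1 ≤ runC ok (r + 1) n := runC_ge ok n (r + 1)
      rcases eq_or_lt_of_le hr with hr0 | hr1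
      · subst hr0
        norm_num
      · rw [if_pos (by omega)]
        rw [show max (r + 1) 2 = r + 1 by omega, show max (r + 1 + 1) 2 = r + 2 by omega]
        conv_rhs => rw [PySem.List.pyRange_one_cons (by omega)]
        rw [show r + 1 + 1 = r + 2 from by ring]
        simp
    · rw [if_neg hok, if_neg hok, PySem.List.pyRange_one_eq_nil (by omega)]
      simp

-- the filtered-range form of one side of the comprehension: the d ≤ run test
theorem filter_le_eq_pyRange (run : Int) :
    ∀ (bnd : Int) (a : Int), run + 1 ≤ bnd →
      (PySem.List.pyRange a bnd 1).filter (fun d => decide (d ≤ run)) = PySem.List.pyRange a (run + 1) 1 := by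
  intro bnd
  have hgen : ∀ (k : Nat) (a : Int), (bnd - a).toNat = k → run + 1 ≤ bnd →
      (PySem.List.pyRange a bnd 1).filter (fun d => decide (d ≤ run)) = PySem.List.pyRange a (run + 1) 1 := by
    intro k
    induction k with
    | zero =>
      intro a hk hb
      rw [PySem.List.pyRange_one_eq_nil (by omega), PySem.List.pyRange_one_eq_nil (by omega)]
      simp
    | succ n ih =>
      intro a hk hb
      have hab : a < bnd := by omega
      rw [PySem.List.pyRange_one_cons hab, List.filter_cons]
      by_cases ha : a ≤ run
      · rw [if_pos (by simpa using ha), ih (a + 1) (by omega) hb,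
            ← PySem.List.pyRange_one_cons (show a < run + 1 by omega)]
      · rw [if_neg (by simpa using ha), ih (a + 1) (by omega) hb,
            PySem.List.pyRange_one_eq_nil (show run + 1 ≤ a + 1 by omega),
            PySem.List.pyRange_one_eq_nil (show run + 1 ≤ a by omega)]
  intro a hb
  exact hgen (bnd - a).toNat a rfl hb

-- THE BRIDGE: A's scan-with-break shape equals B's filtered-range shape, for any cell test p
theorem collect_eq_filter (p : Int → Bool) (f : Int → List Int) (m : Int) (fuel : Nat)
    (hf : m < (fuel : Int)) :
    collect (fun j => decide (j ≤ m) && p j) f 1 fuel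
      = ((PySem.List.pyRange 2 (m + 1) 1).filter
          (fun d => (PySem.List.pyRange 1 (d + 1) 1).all p)).map f := by
  have hbd : ∀ j, 1 ≤ j → (decide (j ≤ m) && p j) = true → j ≤ m := by
    intro j _ h
    simp only [Bool.and_eq_true, decide_eq_true_eq] at h
    exact h.1
  set ok : Int → Bool := fun j => decide (j ≤ m) && p j with hok
  have hrun0 : 0 ≤ runC ok 0 fuel := runC_ge ok fuel 0
  have hrunm : runC ok 0 fuel ≤ max 0 m := runC_le ok m hbd fuel 0 (le_refl 0)
  have hstop : ok (runC ok 0 fuel + 1) = false := runC_stop ok m hbd fuel 0 (le_refl 0) (by omega)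
  set run := runC ok 0 fuel with hr
  have hcol : collect ok f 1 fuel = (PySem.List.pyRange 2 (run + 1) 1).map f := by
    have := collect_eq_pyRange ok f fuel 0 (le_refl 0)
    rw [show ((0 : Int) + 1) = 1 from by ring, show max (1 : Int) 2 = 2 from by omega] at this
    exact this
  rw [hcol]
  by_cases hm : 0 ≤ m
  · have hrm : run ≤ m := by omega
    -- on the range 2..m, the all-prefix test is exactly d ≤ run
    have hcongr : ∀ d ∈ PySem.List.pyRange 2 (m + 1) 1,
        ((PySem.List.pyRange 1 (d + 1) 1).all p) = decide (d ≤ run) := by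
      intro d hd
      rw [PySem.List.mem_pyRange_one] at hd
      by_cases hdr : d ≤ run
      · have hall : (PySem.List.pyRange 1 (d + 1) 1).all p = true := by
          rw [List.all_eq_true]
          intro k hk
          rw [PySem.List.mem_pyRange_one] at hk
          have hokk : ok k = true := runC_prefix ok fuel 0 k (by omega) (by omega)
          simp only [hok, Bool.and_eq_true] at hokk
          exact hokk.2
        rw [hall, decide_eq_true hdr]
      · have hp : p (run + 1) = false := by
          simp only [hok, Bool.and_eq_false_iff] at hstop
          rcases hstop with h1 | h1
          · simp only [decide_eq_false_iff_not] at h1; omega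
          · exact h1
        have hall : (PySem.List.pyRange 1 (d + 1) 1).all p = false := by
          rw [List.all_eq_false]
          exact ⟨run + 1, by rw [PySem.List.mem_pyRange_one]; omega, by simp [hp]⟩
        rw [hall]
        simp [hdr]
      
    rw [List.filter_congr hcongr, filter_le_eq_pyRange run (m + 1) 2 (by omega)]
  · -- m < 0: both ranges are empty
    have hrun : run = 0 := by omega
    rw [hrun, PySem.List.pyRange_one_eq_nil (by omega), PySem.List.pyRange_one_eq_nil (by omega)]
    simp

-- each A loop is the collect skeleton (pure structural facts, no side conditions)
theorem loopA1_eq (b : List (List Int)) (x y : Int) :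
    ∀ (fuel : Nat) (i : Int) (pmv : List (List Int)),
      loopA1 b x y i pmv fuel
        = pmv ++ collect (fun j => decide (y - j ≥ 0) && (cell b x (y - j) == 1))
            (fun j => [x, y - j]) i fuel := by
  intro fuel
  induction fuel with
  | zero => intro i pmv; simp [loopA1, collect]
  | succ n ih =>
    intro i pmv
    simp only [loopA1, collect]
    by_cases hin : y - i ≥ 0
    · rw [if_pos hin]
      by_cases hc : cell b x (y - i) = 1
      · have hok : (decide (y - i ≥ 0) && (cell b x (y - i) == 1)) = true := by
          rw [Bool.and_eq_true]
          exact ⟨decide_eq_true hin, beq_iff_eq.mpr hc⟩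
        rw [hok]
        by_cases hgt : i > 1
        · rw [if_pos ⟨hc, hgt⟩, if_pos hgt, ih (i + 1) (pmv ++ [[x, y - i]])]
          simp [List.append_assoc]
        · rw [if_neg (by tauto), if_neg (by tauto), if_neg hgt, ih (i + 1) pmv]
          simp
      · have hok : (decide (y - i ≥ 0) && (cell b x (y - i) == 1)) = false := by
          rw [Bool.and_eq_false_iff, beq_eq_false_iff_ne]
          exact Or.inr hc
        rw [hok, if_neg (by tauto), if_pos (Or.inr hc)]
        simp
    · have hok : (decide (y - i ≥ 0) && (cell b x (y - i) == 1)) = false := by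
        rw [Bool.and_eq_false_iff]
        exact Or.inl (decide_eq_false hin)
      rw [if_neg hin, hok]
      simp

theorem loopA2_eq (b : List (List Int)) (x y : Int) :
    ∀ (fuel : Nat) (i : Int) (pmv : List (List Int)),
      loopA2 b x y i pmv fuel
        = pmv ++ collect (fun j => decide (x + j < (b.length : Int)) && (cell b (x + j) y == 1))
            (fun j => [x + j, y]) i fuel := by
  intro fuel
  induction fuel with
  | zero => intro i pmv; simp [loopA2, collect]
  | succ n ih =>
    intro i pmv
    simp only [loopA2, collect]
    by_cases hin : x + i < (b.length : Int)
    · rw [if_pos hin]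
      by_cases hc : cell b (x + i) y = 1
      · have hok : (decide (x + i < (b.length : Int)) && (cell b (x + i) y == 1)) = true := by
          rw [Bool.and_eq_true]
          exact ⟨decide_eq_true hin, beq_iff_eq.mpr hc⟩
        rw [hok]
        by_cases hgt : i > 1
        · rw [if_pos ⟨hc, hgt⟩, if_pos hgt, ih (i + 1) (pmv ++ [[x + i, y]])]
          simp [List.append_assoc]
        · rw [if_neg (by tauto), if_neg (by tauto), if_neg hgt, ih (i + 1) pmv]
          simp
      · have hok : (decide (x + i < (b.length : Int)) && (cell b (x + i) y == 1)) = false := by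
          rw [Bool.and_eq_false_iff, beq_eq_false_iff_ne]
          exact Or.inr hc
        rw [hok, if_neg (by tauto), if_pos (Or.inr hc)]
        simp
    · have hok : (decide (x + i < (b.length : Int)) && (cell b (x + i) y == 1)) = false := by
        rw [Bool.and_eq_false_iff]
        exact Or.inl (decide_eq_false hin)
      rw [if_neg hin, hok]
      simp

theorem loopA3_eq (b : List (List Int)) (x y : Int) :
    ∀ (fuel : Nat) (i : Int) (pmv : List (List Int)),
      loopA3 b x y i pmv fuel
        = pmv ++ collect (fun j => decide (y + j < ((b.headD []).length : Int)) && (cell b x (y + j) == 1))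
            (fun j => [x, y + j]) i fuel := by
  intro fuel
  induction fuel with
  | zero => intro i pmv; simp [loopA3, collect]
  | succ n ih =>
    intro i pmv
    simp only [loopA3, collect]
    by_cases hin : y + i < ((b.headD []).length : Int)
    · rw [if_pos hin]
      by_cases hc : cell b x (y + i) = 1
      · have hok : (decide (y + i < ((b.headD []).length : Int)) && (cell b x (y + i) == 1)) = true := by
          rw [Bool.and_eq_true]
          exact ⟨decide_eq_true hin, beq_iff_eq.mpr hc⟩
        rw [hok]
        by_cases hgt : i > 1
        · rw [if_pos ⟨hc, hgt⟩, if_pos hgt, ih (i + 1) (pmv ++ [[x, y + i]])]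
          simp [List.append_assoc]
        · rw [if_neg (by tauto), if_neg (by tauto), if_neg hgt, ih (i + 1) pmv]
          simp
      · have hok : (decide (y + i < ((b.headD []).length : Int)) && (cell b x (y + i) == 1)) = false := by
          rw [Bool.and_eq_false_iff, beq_eq_false_iff_ne]
          exact Or.inr hc
        rw [hok, if_neg (by tauto), if_pos (Or.inr hc)]
        simp
    · have hok : (decide (y + i < ((b.headD []).length : Int)) && (cell b x (y + i) == 1)) = false := by
        rw [Bool.and_eq_false_iff]
        exact Or.inl (decide_eq_false hin)
      rw [if_neg hin, hok]
      simp

theorem loopA4_eq (b : List (List Int)) (x y : Int) :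
    ∀ (fuel : Nat) (i : Int) (pmv : List (List Int)),
      loopA4 b x y i pmv fuel
        = pmv ++ collect (fun j => decide (x - j ≥ 0) && (cell b (x - j) y == 1))
            (fun j => [x - j, y]) i fuel := by
  intro fuel
  induction fuel with
  | zero => intro i pmv; simp [loopA4, collect]
  | succ n ih =>
    intro i pmv
    simp only [loopA4, collect]
    by_cases hin : x - i ≥ 0
    · rw [if_pos hin]
      by_cases hc : cell b (x - i) y = 1
      · have hok : (decide (x - i ≥ 0) && (cell b (x - i) y == 1)) = true := by
          rw [Bool.and_eq_true]
          exact ⟨decide_eq_true hin, beq_iff_eq.mpr hc⟩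
        rw [hok]
        by_cases hgt : i > 1
        · rw [if_pos ⟨hc, hgt⟩, if_pos hgt, ih (i + 1) (pmv ++ [[x - i, y]])]
          simp [List.append_assoc]
        · rw [if_neg (by tauto), if_neg (by tauto), if_neg hgt, ih (i + 1) pmv]
          simp
      · have hok : (decide (x - i ≥ 0) && (cell b (x - i) y == 1)) = false := by
          rw [Bool.and_eq_false_iff, beq_eq_false_iff_ne]
          exact Or.inr hc
        rw [hok, if_neg (by tauto), if_pos (Or.inr hc)]
        simp
    · have hok : (decide (x - i ≥ 0) && (cell b (x - i) y == 1)) = false := by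
        rw [Bool.and_eq_false_iff]
        exact Or.inl (decide_eq_false hin)
      rw [if_neg hin, hok]
      simp

-- ===== VERDICT (by name: the statement is the Claim_ definition above) =====
theorem findPreMoves_spec : Claim_equal_findPreMoves := by
  intro b mv _ hpre
  unfold Spec_findPreMoves
  obtain ⟨h1, h2, h3, h4⟩ := hpre
  rcases mv with _ | ⟨r, tl⟩
  · simp at h1
  rcases r with _ | ⟨x, rest⟩
  · simp at h2
  rcases rest with _ | ⟨y, rest2⟩
  · simp at h2
  simp only [List.headD_cons, List.getD_cons_succ, List.getD_cons_zero] at h3 h4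
  simp only [findPreMoves, findPreMoves_alt, List.headD_cons, List.drop_succ_cons, List.drop_zero]
  by_cases hv : cell b x y = 2
  · rw [if_pos hv, if_neg (by simp [hv])]
    obtain ⟨hx0, hy0, hrect⟩ : 0 ≤ x ∧ 0 ≤ y ∧ ∀ rw ∈ b, rw.length = (b.headD []).length := by
      rcases h4 with h4 | h4
      · exact absurd hv (by unfold cell; exact h4)
      · exact h4
    rcases hrow : PySem.List.pyGet? b x with _ | row
    · simp only [cellOpt, hrow] at h3; simp at h3
    have hxh : x < (b.length : Int) := by
      have hir : PySem.Raise.InRange b.length x := by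
        by_contra hcon
        rw [← PySem.List.pyGet?_eq_none_iff] at hcon
        rw [hcon] at hrow; cases hrow
      simp only [PySem.Raise.InRange] at hir
      omega
    have hyw : y < ((b.headD []).length : Int) := by
      simp only [cellOpt, hrow] at h3
      have hir : PySem.Raise.InRange row.length y := by
        by_contra hcon
        rw [← PySem.List.pyGet?_eq_none_iff] at hcon
        rw [hcon] at h3; simp at h3
      have hlen : row.length = (b.headD []).length :=
        hrect row (PySem.List.mem_of_pyGet?_eq_some b hrow)
      simp only [PySem.Raise.InRange] at hir
      omega
    set h : Int := (b.length : Int) with hh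
    set w : Int := ((b.headD []).length : Int) with hw
    set fuel : Nat := b.length + (b.headD []).length + 1 with hfuel
    have hfw : (fuel : Int) = h + w + 1 := by rw [hfuel, hh, hw]; push_cast; ring
    -- A side: four collects; B side: flatMap over the four dirs
    rw [loopA1_eq, loopA2_eq, loopA3_eq, loopA4_eq]
    simp only [List.flatMap_cons, List.flatMap_nil, List.append_nil, List.append_assoc,
      List.nil_append]
    -- direction 1: (0,-1), m = y
    have hd1 : collect (fun j => decide (y - j ≥ 0) && (cell b x (y - j) == 1))
        (fun j => [x, y - j]) 1 fuel
        = ((PySem.List.pyRange 2 (y + 1) 1).filter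
            (fun d => (PySem.List.pyRange 1 (d + 1) 1).all
              (fun k => cell b (x + 0 * k) (y + (-1) * k) == 1))).map
          (fun d => [x + 0 * d, y + (-1) * d]) := by
      have hfn : (fun j => decide (y - j ≥ 0) && (cell b x (y - j) == 1))
          = (fun j => decide (j ≤ y) && ((fun k => cell b (x + 0 * k) (y + (-1) * k) == 1) j)) := by
        funext j
        beta_reduce
        rw [show x + 0 * j = x from by ring, show y + (-1) * j = y - j from by ring]
        congr 1
        simp only [decide_eq_decide]
        omega
      have hfn2 : (fun j => [x, y - j]) = (fun d => [x + 0 * d, y + (-1) * d]) := by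
        funext j
        rw [show x + 0 * j = x from by ring, show y + (-1) * j = y - j from by ring]
      rw [hfn, hfn2]
      exact collect_eq_filter _ _ y fuel (by omega)
    -- direction 2: (1,0), m = h-1-x
    have hd2 : collect (fun j => decide (x + j < (b.length : Int)) && (cell b (x + j) y == 1))
        (fun j => [x + j, y]) 1 fuel
        = ((PySem.List.pyRange 2 (h - 1 - x + 1) 1).filter
            (fun d => (PySem.List.pyRange 1 (d + 1) 1).all
              (fun k => cell b (x + 1 * k) (y + 0 * k) == 1))).map
          (fun d => [x + 1 * d, y + 0 * d]) := by
      have hfn : (fun j => decide (x + j < (b.length : Int)) && (cell b (x + j) y == 1))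
          = (fun j => decide (j ≤ h - 1 - x) && ((fun k => cell b (x + 1 * k) (y + 0 * k) == 1) j)) := by
        funext j
        beta_reduce
        rw [show x + 1 * j = x + j from by ring, show y + 0 * j = y from by ring]
        congr 1
        simp only [decide_eq_decide]
        rw [← hh]
        omega
      have hfn2 : (fun j => [x + j, y]) = (fun d => [x + 1 * d, y + 0 * d]) := by
        funext j
        rw [show x + 1 * j = x + j from by ring, show y + 0 * j = y from by ring]
      rw [hfn, hfn2]
      exact collect_eq_filter _ _ (h - 1 - x) fuel (by omega)
    -- direction 3: (0,1), m = w-1-y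
    have hd3 : collect (fun j => decide (y + j < ((b.headD []).length : Int)) && (cell b x (y + j) == 1))
        (fun j => [x, y + j]) 1 fuel
        = ((PySem.List.pyRange 2 (w - 1 - y + 1) 1).filter
            (fun d => (PySem.List.pyRange 1 (d + 1) 1).all
              (fun k => cell b (x + 0 * k) (y + 1 * k) == 1))).map
          (fun d => [x + 0 * d, y + 1 * d]) := by
      have hfn : (fun j => decide (y + j < ((b.headD []).length : Int)) && (cell b x (y + j) == 1))
          = (fun j => decide (j ≤ w - 1 - y) && ((fun k => cell b (x + 0 * k) (y + 1 * k) == 1) j)) := by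
        funext j
        beta_reduce
        rw [show x + 0 * j = x from by ring, show y + 1 * j = y + j from by ring]
        congr 1
        simp only [decide_eq_decide]
        rw [← hw]
        omega
      have hfn2 : (fun j => [x, y + j]) = (fun d => [x + 0 * d, y + 1 * d]) := by
        funext j
        rw [show x + 0 * j = x from by ring, show y + 1 * j = y + j from by ring]
      rw [hfn, hfn2]
      exact collect_eq_filter _ _ (w - 1 - y) fuel (by omega)
    -- direction 4: (-1,0), m = x
    have hd4 : collect (fun j => decide (x - j ≥ 0) && (cell b (x - j) y == 1))
        (fun j => [x - j, y]) 1 fuel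
        = ((PySem.List.pyRange 2 (x + 1) 1).filter
            (fun d => (PySem.List.pyRange 1 (d + 1) 1).all
              (fun k => cell b (x + (-1) * k) (y + 0 * k) == 1))).map
          (fun d => [x + (-1) * d, y + 0 * d]) := by
      have hfn : (fun j => decide (x - j ≥ 0) && (cell b (x - j) y == 1))
          = (fun j => decide (j ≤ x) && ((fun k => cell b (x + (-1) * k) (y + 0 * k) == 1) j)) := by
        funext j
        beta_reduce
        rw [show x + (-1) * j = x - j from by ring, show y + 0 * j = y from by ring]
        congr 1
        simp only [decide_eq_decide]
        omega
      have hfn2 : (fun j => [x - j, y]) = (fun d => [x + (-1) * d, y + 0 * d]) := by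
        funext j
        rw [show x + (-1) * j = x - j from by ring, show y + 0 * j = y from by ring]
      rw [hfn, hfn2]
      exact collect_eq_filter _ _ x fuel (by omega)
    rw [hd1, hd2, hd3, hd4]
  · rw [if_neg hv, if_pos (by simp [hv])]
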